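-- pv_equiv track=rewrite | github.com/diegoforni/Algoritmos2 | practicas/tp-hashtable/code/dictionary.py | ejercicio4
-- ===== SOURCE A (Python) =====
-- def hash(k):
--     return k % 9
--
-- def insert(D, key, value):
--     hashKey = hash(key)
--
--     listToInsert = [key, value]
--
--     if len(D) == 0:
--         D = []
--         for i in range(9):
--             D.insert(i, [])
--
--     if len(D[hashKey]) >= 1:
--         bucket = D[hashKey]
--         for element in bucket:
--             if element[0] == key:
--                 element[1] = value
--                 return D
--
--     D[hashKey].append(listToInsert)
--
--     return D  # Return the updated dictionary
--
-- def delete(D, key):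
--     hashKey = hash(key)
--     bucket = D[hashKey]
--
--     i = 0
--
--     for list in bucket:
--         if list[0] == key:
--             bucket.pop(i)
--             return D
--         i += 1
--
-- def ejercicio4(str1, str2):
--     if len(str1) != len(str2):
--         return False
--     #insertar cada caracter de str1
--     dic = []
--     for i in range(len(str1)):
--         dic = insert(dic, ord(str1[i]), str1[i])
--
--
--     # eliminar cada caracter de str2 en str1
--     for j in range(len(str2)):
--         delete(dic, ord(str2[j]))
--
--
--
--     for bucket in dic:
--         if len(bucket) != 0:
--             return False
--     return True
-- ===== SOURCE B (Python) =====
-- def ejercicio4(str1, str2):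
--     if len(str1) != len(str2):
--         return False
--     return all(ch in str2 for ch in str1)
-- ===== Notes on version B (the rewrite author's own statement) =====
-- stated objective: simpler
-- what changed: A builds a 9-bucket chained hash table from str1's chars, deletes str2's chars from it, then scans the buckets; B keeps only the length guard and checks each char of str1 by direct membership in str2.
import Mathlib
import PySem

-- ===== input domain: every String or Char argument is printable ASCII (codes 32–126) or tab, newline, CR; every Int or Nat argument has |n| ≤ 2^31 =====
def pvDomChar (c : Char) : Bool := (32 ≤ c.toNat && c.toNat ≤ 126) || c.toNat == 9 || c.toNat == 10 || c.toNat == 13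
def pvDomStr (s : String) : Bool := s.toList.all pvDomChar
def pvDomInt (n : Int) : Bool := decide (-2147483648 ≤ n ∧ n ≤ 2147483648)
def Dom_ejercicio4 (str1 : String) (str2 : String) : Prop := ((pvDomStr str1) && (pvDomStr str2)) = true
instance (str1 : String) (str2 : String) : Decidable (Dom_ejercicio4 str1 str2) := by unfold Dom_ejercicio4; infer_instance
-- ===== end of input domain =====

-- B replaces A's hand-rolled 9-bucket hash table (build from str1, delete str2's chars,
-- scan buckets) by a length guard plus a direct membership scan of str2 for each char of
-- str1 — objective: simpler (shorter, no table).

-- ===== PORT A =====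
-- the module's hash function: k % 9 (Python %, here always applied to ord values)
def pvHash (k : Int) : Int := PySem.Int.mod k 9

-- the 'for element in bucket: if element[0] == key: element[1] = value; return D' loop of
-- insert: first-match in-place overwrite; none = key not present in the bucket
def pvOverwrite : List (Int × Char) → Int → Char → Option (List (Int × Char))
  | [], _, _ => none
  | p :: rest, key, value =>
    if p.1 = key then some ((p.1, value) :: rest)
    else (pvOverwrite rest key value).map (p :: ·)

-- 'insert' from the module; D[hashKey] with hashKey = key % 9 ∈ [0,8] and len(D) = 9, so
-- .toNat / getD / set are exact for the reachable indices
def pvInsert (D : List (List (Int × Char))) (key : Int) (value : Char) :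
    List (List (Int × Char)) :=
  let h := (pvHash key).toNat
  let D0 := if D.length = 0 then List.replicate 9 [] else D
  let bucket := D0.getD h []
  if 1 ≤ bucket.length then
    match pvOverwrite bucket key value with
    | some b => D0.set h b
    | none => D0.set h (bucket ++ [(key, value)])
  else D0.set h (bucket ++ [(key, value)])

-- the 'for list in bucket: if list[0] == key: bucket.pop(i); return D' loop of delete
def pvPop : List (Int × Char) → Int → List (Int × Char)
  | [], _ => []
  | p :: rest, key => if p.1 = key then rest else p :: pvPop rest key

def pvDelete (D : List (List (Int × Char))) (key : Int) : List (List (Int × Char)) :=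
  D.set (pvHash key).toNat (pvPop (D.getD (pvHash key).toNat []) key)

def ejercicio4 (str1 : String) (str2 : String) : Bool :=
  if str1.toList.length ≠ str2.toList.length then false
  else
    let dic : List (List (Int × Char)) :=
      str1.toList.foldl (fun d c => pvInsert d (c.toNat : Int) c) []
    let dic2 := str2.toList.foldl (fun d c => pvDelete d (c.toNat : Int)) dic
    dic2.all (fun bucket => bucket.length == 0)

-- ===== PORT B =====
def ejercicio4_alt (str1 : String) (str2 : String) : Bool :=
  str1.toList.length == str2.toList.length &&
    str1.toList.all (fun ch => str2.toList.contains ch)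

-- ===== PRECONDITION & SPEC =====
def Spec_ejercicio4 (str1 : String) (str2 : String) (out : Bool) : Prop := out = ejercicio4_alt str1 str2
instance (str1 : String) (str2 : String) (out : Bool) : Decidable (Spec_ejercicio4 str1 str2 out) := by unfold Spec_ejercicio4; infer_instance

-- ===== CLAIM (what is proved, stated in full; the proofs are below) =====
def Claim_equal_ejercicio4 : Prop := ∀ (str1 : String) (str2 : String), Dom_ejercicio4 str1 str2 → Spec_ejercicio4 str1 str2 (ejercicio4 str1 str2)

-- ===== LEMMAS AND PROOFS =====

-- 'key k occurs somewhere in the table'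
def pvMemK (k : Int) (D : List (List (Int × Char))) : Prop :=
  ∃ b ∈ D, ∃ p ∈ b, p.1 = k

-- well-formed table: 9 buckets, every pair sits in the bucket of its key's hash, and the
-- keys within one bucket are distinct
def pvWF (D : List (List (Int × Char))) : Prop :=
  D.length = 9 ∧ ∀ i, (hi : i < D.length) →
    (∀ p ∈ D[i], (pvHash p.1).toNat = i) ∧ ((D[i]).map Prod.fst).Nodup

theorem pvHash_toNat_lt (k : Int) : (pvHash k).toNat < 9 := by
  have h1 : 0 ≤ pvHash k := PySem.Int.mod_nonneg k (by norm_num)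
  have h2 : pvHash k < 9 := PySem.Int.mod_lt k (by norm_num)
  omega

theorem pvOverwrite_none {b : List (Int × Char)} {k : Int} {v : Char}
    (h : pvOverwrite b k v = none) : ∀ p ∈ b, p.1 ≠ k := by
  induction b with
  | nil => simp
  | cons p rest ih =>
    simp only [pvOverwrite] at h
    by_cases hk : p.1 = k
    · simp [hk] at h
    · simp only [if_neg hk, Option.map_eq_none_iff] at h
      intro q hq
      rcases List.mem_cons.mp hq with rfl | hq
      · exact hk
      · exact ih h q hq

theorem pvOverwrite_some {b b' : List (Int × Char)} {k : Int} {v : Char}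
    (h : pvOverwrite b k v = some b') :
    b'.map Prod.fst = b.map Prod.fst ∧ ∃ p ∈ b, p.1 = k := by
  induction b generalizing b' with
  | nil => simp [pvOverwrite] at h
  | cons p rest ih =>
    simp only [pvOverwrite] at h
    by_cases hk : p.1 = k
    · rw [if_pos hk, Option.some_inj] at h
      subst h
      exact ⟨by simp, ⟨p, by simp, hk⟩⟩
    · simp only [if_neg hk, Option.map_eq_some_iff] at h
      obtain ⟨b'', hb'', rfl⟩ := h
      obtain ⟨hkeys, q, hq, hqk⟩ := ih hb''
      exact ⟨by simp [hkeys], ⟨q, by simp [hq], hqk⟩⟩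

theorem pvPop_keys (b : List (Int × Char)) (k : Int) :
    (pvPop b k).map Prod.fst = (b.map Prod.fst).erase k := by
  induction b with
  | nil => simp [pvPop]
  | cons p rest ih =>
    by_cases hk : p.1 = k
    · simp [pvPop, hk, List.erase_cons]
    · simp [pvPop, hk, List.erase_cons, Ne.symm hk, ih]

theorem pvPop_subset (b : List (Int × Char)) (k : Int) : ∀ p ∈ pvPop b k, p ∈ b := by
  induction b with
  | nil => simp [pvPop]
  | cons p rest ih =>
    by_cases hk : p.1 = k
    · rw [pvPop, if_pos hk]; intro q hq; exact List.mem_cons.mpr (Or.inr hq)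
    · simp only [pvPop, if_neg hk]
      intro q hq
      rcases List.mem_cons.mp hq with hq | hq
      · simp [hq]
      · exact List.mem_cons.mpr (Or.inr (ih q hq))

theorem pvMemK_decomp {D : List (List (Int × Char))} {h : Nat} (hh : h < D.length) (k : Int) :
    pvMemK k D ↔ (∃ p ∈ D[h], p.1 = k) ∨
      ∃ i, ∃ hi : i < D.length, i ≠ h ∧ ∃ p ∈ D[i], p.1 = k := by
  constructor
  · rintro ⟨b, hb, p, hp, hpk⟩
    obtain ⟨i, hi, rfl⟩ := List.mem_iff_getElem.mp hb
    by_cases hih : i = h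
    · subst hih; exact Or.inl ⟨p, hp, hpk⟩
    · exact Or.inr ⟨i, hi, hih, p, hp, hpk⟩
  · rintro (⟨p, hp, hpk⟩ | ⟨i, hi, _, p, hp, hpk⟩)
    · exact ⟨D[h], List.getElem_mem hh, p, hp, hpk⟩
    · exact ⟨D[i], List.getElem_mem hi, p, hp, hpk⟩

theorem pvMemK_set {D : List (List (Int × Char))} {h : Nat} (hh : h < D.length)
    (b : List (Int × Char)) (k : Int) :
    pvMemK k (D.set h b) ↔ (∃ p ∈ b, p.1 = k) ∨
      ∃ i, ∃ hi : i < D.length, i ≠ h ∧ ∃ p ∈ D[i], p.1 = k := by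
  rw [pvMemK_decomp (h := h) (by simpa using hh) k]
  constructor
  · rintro (hp | ⟨i, hi, hih, p, hp, hpk⟩)
    · exact Or.inl (by simpa using hp)
    · refine Or.inr ⟨i, by simpa using hi, hih, p, ?_, hpk⟩
      rwa [List.getElem_set_ne (by omega)] at hp
  · rintro (hp | ⟨i, hi, hih, p, hp, hpk⟩)
    · exact Or.inl (by simpa using hp)
    · refine Or.inr ⟨i, by simpa using hi, hih, p, ?_, hpk⟩
      rwa [List.getElem_set_ne (by omega)]

theorem pvWF_set {D : List (List (Int × Char))} (hWF : pvWF D) {h : Nat} (hh : h < D.length)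
    {b : List (Int × Char)} (hkeys : ∀ p ∈ b, (pvHash p.1).toNat = h)
    (hnd : (b.map Prod.fst).Nodup) : pvWF (D.set h b) := by
  refine ⟨by simpa using hWF.1, fun i hi => ?_⟩
  by_cases hih : i = h
  · subst hih
    rw [List.getElem_set_self (by simpa using hi)]
    exact ⟨hkeys, hnd⟩
  · rw [List.getElem_set_ne (by omega)]
    exact hWF.2 i (by simpa using hi)

theorem pvKeys_mem (b : List (Int × Char)) (k : Int) :
    (∃ p ∈ b, p.1 = k) ↔ k ∈ b.map Prod.fst := by
  simp [List.mem_map]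

theorem pvInsert_eq (D : List (List (Int × Char))) (key : Int) (value : Char) :
    pvInsert D key value =
      (if D.length = 0 then List.replicate 9 [] else D).set (pvHash key).toNat
        (match pvOverwrite ((if D.length = 0 then List.replicate 9 [] else D).getD
            (pvHash key).toNat []) key value with
          | some b => b
          | none => (if D.length = 0 then List.replicate 9 [] else D).getD
              (pvHash key).toNat [] ++ [(key, value)]) := by
  unfold pvInsert
  by_cases hb : 1 ≤ ((if D.length = 0 then List.replicate 9 [] else D).getD
      (pvHash key).toNat []).length
  · simp only [if_pos hb]
    cases pvOverwrite ((if D.length = 0 then List.replicate 9 [] else D).getD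
        (pvHash key).toNat []) key value <;> rfl
  · have hnil : (if D.length = 0 then List.replicate 9 [] else D).getD
        (pvHash key).toNat [] = [] := List.eq_nil_of_length_eq_zero (by omega)
    simp only [if_neg hb, hnil]
    rfl

theorem pvInsert_spec (D : List (List (Int × Char))) (c : Char)
    (hD : D = [] ∨ pvWF D) :
    pvWF (pvInsert D (c.toNat : Int) c) ∧
      ∀ k, (pvMemK k (pvInsert D (c.toNat : Int) c) ↔ pvMemK k D ∨ k = (c.toNat : Int)) := by
  set key : Int := (c.toNat : Int) with hkey
  set D0 : List (List (Int × Char)) := if D.length = 0 then List.replicate 9 [] else D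
    with hD0
  have hWF0 : pvWF D0 := by
    rcases hD with rfl | hWF
    · have hrep : D0 = List.replicate 9 [] := by simp [hD0]
      rw [hrep]
      refine ⟨by simp, fun i hi => ?_⟩
      simp only [List.length_replicate] at hi
      interval_cases i <;> simp
    · have h9 : D.length ≠ 0 := by rw [hWF.1]; decide
      simpa [hD0, h9] using hWF
  have hmem0 : ∀ k, pvMemK k D0 ↔ pvMemK k D := by
    intro k
    rcases hD with rfl | hWF
    · constructor
      · rintro ⟨b, hb, p, hp, _⟩
        simp [hD0] at hb
        rw [hb] at hp
        simp at hp
      · rintro ⟨b, hb, _⟩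
        simp at hb
    · have h9 : D.length ≠ 0 := by rw [hWF.1]; decide
      simp [hD0, h9]
  have hh : (pvHash key).toNat < D0.length := by rw [hWF0.1]; exact pvHash_toNat_lt key
  have hbkt : D0.getD (pvHash key).toNat [] = D0[(pvHash key).toNat] :=
    List.getD_eq_getElem D0 [] hh
  have hhash : ∀ p ∈ D0[(pvHash key).toNat], (pvHash p.1).toNat = (pvHash key).toNat :=
    (hWF0.2 _ hh).1
  have hnd : ((D0[(pvHash key).toNat]).map Prod.fst).Nodup := (hWF0.2 _ hh).2
  rw [pvInsert_eq, ← hD0, hbkt]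
  cases hov : pvOverwrite (D0[(pvHash key).toNat]) key c with
  | some b' =>
    obtain ⟨hkeys, hkmem⟩ := pvOverwrite_some hov
    constructor
    · refine pvWF_set hWF0 hh (fun p hp => ?_) (by rw [hkeys]; exact hnd)
      have : p.1 ∈ b'.map Prod.fst := List.mem_map.mpr ⟨p, hp, rfl⟩
      rw [hkeys] at this
      obtain ⟨q, hq, hq1⟩ := List.mem_map.mp this
      rw [← hq1]
      exact hhash q hq
    · intro k
      rw [pvMemK_set hh, ← hmem0 k, pvMemK_decomp hh k, pvKeys_mem, pvKeys_mem, hkeys]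
      constructor
      · rintro (h | h)
        · exact Or.inl (Or.inl h)
        · exact Or.inl (Or.inr h)
      · rintro ((h | h) | h)
        · exact Or.inl h
        · exact Or.inr h
        · rw [h]
          exact Or.inl ((pvKeys_mem _ _).mp hkmem)
  | none =>
    have hknot : key ∉ (D0[(pvHash key).toNat]).map Prod.fst := by
      intro hmem
      obtain ⟨p, hp, hp1⟩ := List.mem_map.mp hmem
      exact pvOverwrite_none hov p hp hp1
    constructor
    · refine pvWF_set hWF0 hh (fun p hp => ?_) ?_
      · rcases List.mem_append.mp hp with hp | hp
        · exact hhash p hp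
        · simp only [List.mem_singleton] at hp
          subst hp
          rfl
      · rw [List.map_append, List.nodup_append]
        refine ⟨hnd, by simp, ?_⟩
        intro a ha b hbmem
        simp only [List.map_cons, List.map_nil, List.mem_singleton] at hbmem
        subst hbmem
        intro hab
        rw [hab] at ha
        exact hknot ha
    · intro k
      rw [pvMemK_set hh, ← hmem0 k, pvMemK_decomp hh k, pvKeys_mem, pvKeys_mem,
        List.map_append]
      simp only [List.mem_append, List.map_cons, List.map_nil, List.mem_singleton]
      constructor
      · rintro ((h | h) | h)
        · exact Or.inl (Or.inl h)
        · exact Or.inr h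
        · exact Or.inl (Or.inr h)
      · rintro ((h | h) | h)
        · exact Or.inl (Or.inl h)
        · exact Or.inr h
        · exact Or.inl (Or.inr h)

theorem pvDelete_spec (D : List (List (Int × Char))) (c : Char) (hD : pvWF D) :
    pvWF (pvDelete D (c.toNat : Int)) ∧
      ∀ k, (pvMemK k (pvDelete D (c.toNat : Int)) ↔ pvMemK k D ∧ k ≠ (c.toNat : Int)) := by
  set key : Int := (c.toNat : Int) with hkey
  have hh : (pvHash key).toNat < D.length := by rw [hD.1]; exact pvHash_toNat_lt key
  have hbkt : D.getD (pvHash key).toNat [] = D[(pvHash key).toNat] :=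
    List.getD_eq_getElem D [] hh
  have hhash : ∀ p ∈ D[(pvHash key).toNat], (pvHash p.1).toNat = (pvHash key).toNat :=
    (hD.2 _ hh).1
  have hnd : ((D[(pvHash key).toNat]).map Prod.fst).Nodup := (hD.2 _ hh).2
  unfold pvDelete
  rw [hbkt]
  constructor
  · refine pvWF_set hD hh (fun p hp => hhash p (pvPop_subset _ _ p hp)) ?_
    rw [pvPop_keys]
    exact hnd.erase key
  · intro k
    rw [pvMemK_set hh, pvMemK_decomp hh k, pvKeys_mem, pvKeys_mem, pvPop_keys,
      hnd.mem_erase_iff]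
    constructor
    · rintro (⟨hne, hmem⟩ | ⟨i, hi, hih, p, hp, hpk⟩)
      · exact ⟨Or.inl hmem, hne⟩
      · refine ⟨Or.inr ⟨i, hi, hih, p, hp, hpk⟩, fun hkk => ?_⟩
        apply hih
        rw [← (hD.2 i hi).1 p hp, hpk, hkk]
    · rintro ⟨h | h, hne⟩
      · exact Or.inl ⟨hne, h⟩
      · exact Or.inr h

theorem pvInsert_fold (l : List Char) (D : List (List (Int × Char))) (hD : pvWF D) :
    pvWF (l.foldl (fun d c => pvInsert d (c.toNat : Int) c) D) ∧
      ∀ k, (pvMemK k (l.foldl (fun d c => pvInsert d (c.toNat : Int) c) D) ↔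
        pvMemK k D ∨ ∃ c ∈ l, (c.toNat : Int) = k) := by
  induction l generalizing D with
  | nil => simp [hD]
  | cons c cs ih =>
    obtain ⟨hWF, hmem⟩ := pvInsert_spec D c (Or.inr hD)
    obtain ⟨hWF', hmem'⟩ := ih _ hWF
    refine ⟨hWF', fun k => ?_⟩
    rw [List.foldl_cons, hmem' k]
    rw [hmem k]
    constructor
    · rintro ((h | h) | ⟨d, hd, hdk⟩)
      · exact Or.inl h
      · exact Or.inr ⟨c, by simp, h.symm⟩
      · exact Or.inr ⟨d, by simp [hd], hdk⟩
    · rintro (h | ⟨d, hd, hdk⟩)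
      · exact Or.inl (Or.inl h)
      · rcases List.mem_cons.mp hd with rfl | hd
        · exact Or.inl (Or.inr hdk.symm)
        · exact Or.inr ⟨d, hd, hdk⟩

theorem pvDelete_fold (l : List Char) (D : List (List (Int × Char))) (hD : pvWF D) :
    pvWF (l.foldl (fun d c => pvDelete d (c.toNat : Int)) D) ∧
      ∀ k, (pvMemK k (l.foldl (fun d c => pvDelete d (c.toNat : Int)) D) ↔
        pvMemK k D ∧ ∀ c ∈ l, k ≠ (c.toNat : Int)) := by
  induction l generalizing D with
  | nil => simp [hD]
  | cons c cs ih =>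
    obtain ⟨hWF, hmem⟩ := pvDelete_spec D c hD
    obtain ⟨hWF', hmem'⟩ := ih _ hWF
    refine ⟨hWF', fun k => ?_⟩
    rw [List.foldl_cons, hmem' k, hmem k]
    constructor
    · rintro ⟨⟨h1, h2⟩, h3⟩
      refine ⟨h1, fun d hd => ?_⟩
      rcases List.mem_cons.mp hd with rfl | hd
      · exact h2
      · exact h3 d hd
    · rintro ⟨h1, h2⟩
      exact ⟨⟨h1, h2 c (by simp)⟩, fun d hd => h2 d (by simp [hd])⟩

theorem pvAll_empty (D : List (List (Int × Char))) :
    (∀ b ∈ D, b.length = 0) ↔ ∀ k, ¬ pvMemK k D := by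
  constructor
  · intro hall k ⟨b, hb, p, hp, _⟩
    have := hall b hb
    rw [List.length_eq_zero_iff] at this
    rw [this] at hp
    simp at hp
  · intro hmem b hb
    match b with
    | [] => rfl
    | p :: rest => exact absurd ⟨p :: rest, hb, p, by simp, rfl⟩ (hmem p.1)

theorem pvChar_toNat_inj {c d : Char} (h : c.toNat = d.toNat) : c = d := by
  exact Char.ext (UInt32.toNat_inj.mp h)

-- ===== VERDICT (by name: the statement is the Claim_ definition above) =====
theorem ejercicio4_spec : Claim_equal_ejercicio4 := by
  intro str1 str2 _
  unfold Spec_ejercicio4 ejercicio4 ejercicio4_alt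
  by_cases hlen : str1.toList.length = str2.toList.length
  · rw [if_neg (by omega)]
    rw [Bool.eq_iff_iff]
    simp only [Bool.and_eq_true, beq_iff_eq, List.all_eq_true, List.contains_iff_mem]
    cases hl1 : str1.toList with
    | nil =>
      have hl2 : str2.toList = [] := by
        have := hlen
        rw [hl1] at this
        exact List.eq_nil_of_length_eq_zero this.symm
      simp [hl2]
    | cons c cs =>
      rw [hl1] at hlen
      obtain ⟨hWF1, hmem1⟩ := pvInsert_spec [] c (Or.inl rfl)
      obtain ⟨hWF2, hmem2⟩ := pvInsert_fold cs _ hWF1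
      obtain ⟨hWF3, hmem3⟩ := pvDelete_fold str2.toList _ hWF2
      rw [List.foldl_cons, pvAll_empty]
      have hmemIns : ∀ k, pvMemK k (cs.foldl (fun d c => pvInsert d (c.toNat : Int) c)
          (pvInsert [] (c.toNat : Int) c)) ↔ ∃ d ∈ c :: cs, (d.toNat : Int) = k := by
        intro k
        rw [hmem2 k, hmem1 k]
        simp only [pvMemK, List.not_mem_nil, false_and, exists_const, exists_false,
          false_or, List.mem_cons]
        constructor
        · rintro (h | ⟨d, hd, hdk⟩)
          · exact ⟨c, Or.inl rfl, h.symm⟩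
          · exact ⟨d, Or.inr hd, hdk⟩
        · rintro ⟨d, hd | hd, hdk⟩
          · subst hd; exact Or.inl hdk.symm
          · exact Or.inr ⟨d, hd, hdk⟩
      constructor
      · intro hall
        refine ⟨hlen, fun d hd => ?_⟩
        have hnall := hall (d.toNat : Int)
        rw [hmem3, hmemIns] at hnall
        push_neg at hnall
        obtain ⟨e, he, hde⟩ := hnall ⟨d, hd, rfl⟩
        have : d = e := pvChar_toNat_inj (by exact_mod_cast hde)
        rw [this]
        exact he
      · rintro ⟨-, hsub⟩ k hk
        rw [hmem3, hmemIns] at hk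
        obtain ⟨⟨d, hd, hdk⟩, hnot⟩ := hk
        exact hnot d (hsub d hd) (by rw [hdk])
  · rw [if_pos (by omega)]
    rw [Bool.eq_iff_iff]
    simp only [Bool.false_eq_true, false_iff, Bool.and_eq_true, beq_iff_eq, not_and]
    intro h
    exact absurd h hlen
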